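-- pv_equiv track=rewrite | github.com/zqzqz/IS_course_mini_tools | ISmath2.py | num_to_str
-- ===== SOURCE A (Python) =====
-- def num_to_str(num):
--     result = ""
--     for sub in num:
--         tmp = ""
--         tnum = sub
--         for i in range(4):
--             tmp = str(chr(tnum%(16*16))) + tmp
--             tnum = tnum // (16*16)
--         result += tmp
--     return result
-- ===== SOURCE B (Python) =====
-- def num_to_str(num):
--     return ''.join((n % 0x100000000).to_bytes(4, 'big').decode('latin-1') for n in num)
-- ===== Notes on version B (the rewrite author's own statement) =====
-- stated objective: idiomatic
-- what changed: Replaces the manual per-digit %256//256 accumulation loop with a one-liner that masks each int to 32 bits via % 0x100000000 and emits its 4 big-endian bytes with int.to_bytes, decoded latin-1 and joined.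
import Mathlib
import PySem

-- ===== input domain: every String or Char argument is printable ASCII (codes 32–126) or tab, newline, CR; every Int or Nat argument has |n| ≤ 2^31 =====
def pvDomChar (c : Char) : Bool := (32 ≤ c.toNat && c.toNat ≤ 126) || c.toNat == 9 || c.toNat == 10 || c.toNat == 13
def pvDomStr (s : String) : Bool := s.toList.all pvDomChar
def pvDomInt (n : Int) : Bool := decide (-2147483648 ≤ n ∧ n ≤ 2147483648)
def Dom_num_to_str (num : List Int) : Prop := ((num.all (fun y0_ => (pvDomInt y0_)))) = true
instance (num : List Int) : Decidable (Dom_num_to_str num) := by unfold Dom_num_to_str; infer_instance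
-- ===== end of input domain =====

-- B replaces A's manual %256//256 digit-accumulation loop by emitting, per element,
-- the 4 big-endian bytes of the value masked to 32 bits (int.to_bytes in Python).

-- ===== PORT A =====
-- inner 'for i in range(4)' loop: state is (tmp, tnum); strings are tracked as List Char
def numToStrInnerA (sub : Int) : List Char × Int :=
  (List.range 4).foldl
    (fun (st : List Char × Int) _ =>
      ([Char.ofNat (PySem.Int.mod st.2 256).toNat] ++ st.1, PySem.Int.floordiv st.2 256))
    ([], sub)

def num_to_str (num : List Int) : String :=
  String.mk (num.foldl (fun result sub => result ++ (numToStrInnerA sub).1) [])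

-- ===== PORT B =====
-- per element: m = n % 0x100000000, then the 4 big-endian bytes of m (to_bytes(4,'big')),
-- each byte decoded as the char of its code (latin-1); all joined
def numToStrBytesB (n : Int) : List Char :=
  let m := PySem.Int.mod n 4294967296
  [16777216, 65536, 256, 1].map (fun d => Char.ofNat ((m / d) % 256).toNat)

def num_to_str_alt (num : List Int) : String :=
  String.mk (num.flatMap numToStrBytesB)

-- ===== PRECONDITION & SPEC =====
def Spec_num_to_str (num : List Int) (out : String) : Prop := out = num_to_str_alt num
instance (num : List Int) (out : String) : Decidable (Spec_num_to_str num out) := by unfold Spec_num_to_str; infer_instance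

-- ===== CLAIM (what is proved, stated in full; the proofs are below) =====
def Claim_equal_num_to_str : Prop := ∀ (num : List Int), Dom_num_to_str num → Spec_num_to_str num (num_to_str num)

-- ===== LEMMAS AND PROOFS =====
lemma fdiv256 (n : Int) : PySem.Int.floordiv n 256 = n / 256 :=
  PySem.Int.floordiv_eq_ediv_of_pos (by norm_num)

lemma mod256 (n : Int) : PySem.Int.mod n 256 = n % 256 :=
  PySem.Int.mod_eq_emod_of_pos (by norm_num)

lemma inner_eq_bytes (n : Int) : (numToStrInnerA n).1 = numToStrBytesB n := by
  simp only [numToStrInnerA, numToStrBytesB, List.range, List.range.loop, List.foldl,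
    List.map, fdiv256, mod256, PySem.Int.mod_eq_emod_of_pos (a := n) (by norm_num : (0:Int) < 4294967296),
    List.nil_append, List.cons_append]
  refine congrArg₂ _ ?_ (congrArg₂ _ ?_ (congrArg₂ _ ?_ (congrArg₂ _ ?_ rfl))) <;>
    exact congrArg Char.ofNat (by omega)

-- ===== VERDICT (by name: the statement is the Claim_ definition above) =====
theorem num_to_str_spec : Claim_equal_num_to_str := by
  intro num _
  unfold Spec_num_to_str num_to_str num_to_str_alt
  rw [PySem.List.foldl_append_eq_flatMap]
  simp only [List.nil_append]
  rw [funext inner_eq_bytes]
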